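-- pv_equiv track=rewrite | github.com/VGovindarajan/H_Assembler | HackAssembler.py | get_parsed_command
-- ===== SOURCE A (Python) =====
-- def get_parsed_command(line:str) -> str:
--     p = ""
--     line = line.strip()
--     if len(line) == 0:
--         return p
--     is_prev_char_comment = False
--     for ch in line:
--         if ch is None or len(ch) == 0:
--             continue
--         if ch == '/':
--             if is_prev_char_comment:
--                 return  p
--             else:
--                 is_prev_char_comment = True
--         if ch != '/':
--             is_prev_char_comment = False
--             p = p + ch
--
--     return p
-- ===== SOURCE B (Python) =====
-- def get_parsed_command(line: str) -> str:
--     line = line.strip()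
--     i = line.find('//')
--     prefix = line if i == -1 else line[:i]
--     return ''.join(c for c in prefix if c != '/')
-- ===== Notes on version B (the rewrite author's own statement) =====
-- stated objective: simpler
-- what changed: Replaces the manual per-character state-machine loop with library calls: find the first comment marker, cut the line there, then filter out the remaining lone slash characters.
import Mathlib
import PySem

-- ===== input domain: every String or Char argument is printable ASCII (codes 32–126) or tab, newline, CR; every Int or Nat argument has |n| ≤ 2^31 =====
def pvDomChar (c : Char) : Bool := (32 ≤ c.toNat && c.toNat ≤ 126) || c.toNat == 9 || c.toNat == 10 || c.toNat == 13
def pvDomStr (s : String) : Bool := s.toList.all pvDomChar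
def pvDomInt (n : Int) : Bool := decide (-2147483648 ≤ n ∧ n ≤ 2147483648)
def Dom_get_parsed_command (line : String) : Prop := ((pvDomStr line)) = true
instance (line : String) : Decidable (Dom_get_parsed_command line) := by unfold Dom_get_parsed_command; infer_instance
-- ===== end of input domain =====

-- B replaces A's manual character state-machine loop with find-'//', cut, then filter lone '/' (simpler decomposition, same cost).


-- ===== PORT A =====
-- A's for-loop: state p (accumulated output) and is_prev_char_comment; an early 'return p' on the second '/' of '//'
def goA : List Char → String → Bool → String
  | [], p, _ => p
  | c :: cs, p, prev =>
    if c = '/' then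
      if prev then p else goA cs p true
    else goA cs (p.push c) false

def get_parsed_command (line : String) : String :=
  let l := PySem.Str.strip line
  if PySem.Str.len l = 0 then "" else goA l.toList "" false

-- ===== PORT B =====
def get_parsed_command_alt (line : String) : String :=
  let l := PySem.Str.strip line
  let i := PySem.Str.find l "//"
  let pre := if i = -1 then l else PySem.Str.slice l none (some i)
  String.ofList (pre.toList.filter (fun c => c ≠ '/'))

-- ===== PRECONDITION & SPEC =====
def Spec_get_parsed_command (line : String) (out : String) : Prop := out = get_parsed_command_alt line
instance (line : String) (out : String) : Decidable (Spec_get_parsed_command line out) := by unfold Spec_get_parsed_command; infer_instance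

-- ===== CLAIM (what is proved, stated in full; the proofs are below) =====
def Claim_equal_get_parsed_command : Prop := ∀ (line : String), Dom_get_parsed_command line → Spec_get_parsed_command line (get_parsed_command line)

-- ===== LEMMAS AND PROOFS =====

/-- truncation at the first occurrence of "//" -/
def tb : List Char → List Char
  | [] => []
  | [c] => [c]
  | c :: d :: cs => if c = '/' ∧ d = '/' then [] else c :: tb (d :: cs)

lemma tb_cons_ne (d : Char) (cs : List Char) (hd : d ≠ '/') : tb (d :: cs) = d :: tb cs := by
  cases cs with
  | nil => simp [tb]
  | cons e cs => simp [tb, hd]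

lemma goA_eq_tb_filter (n : Nat) : ∀ cs : List Char, cs.length ≤ n → ∀ p : String,
    (goA cs p false).toList = p.toList ++ (tb cs).filter (fun c => c ≠ '/') := by
  induction n with
  | zero =>
    intro cs h p
    have : cs = [] := List.eq_nil_of_length_eq_zero (Nat.le_zero.mp h)
    subst this
    simp [goA, tb]
  | succ n ih =>
    intro cs h p
    match cs with
    | [] => simp [goA, tb]
    | [c] =>
      by_cases hc : c = '/'
      · subst hc; simp [goA, tb]
      · simp [goA, tb, hc, String.toList_push]
    | c :: d :: cs =>
      by_cases hc : c = '/'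
      · subst hc
        by_cases hd : d = '/'
        · subst hd; simp [goA, tb]
        · have hlen2 : cs.length ≤ n := by
            simp only [List.length_cons] at h ⊢; omega
          have h2 := ih cs hlen2 (p.push d)
          have hstep : goA ('/' :: d :: cs) p false = goA cs (p.push d) false := by
            simp [goA, hd]
          rw [hstep, h2, String.toList_push]
          rw [show tb ('/' :: d :: cs) = '/' :: tb (d :: cs) by simp [tb, hd],
              tb_cons_ne d cs hd]
          simp [hd]
      · have hlen : (d :: cs).length ≤ n := by
          simp only [List.length_cons] at h ⊢; omega
        have h1 := ih (d :: cs) hlen (p.push c)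
        have hstep : goA (c :: d :: cs) p false = goA (d :: cs) (p.push c) false := by
          simp [goA, hc]
        rw [hstep, h1, String.toList_push, tb_cons_ne c (d :: cs) hc]
        simp [hc]

lemma tb_of_not_infix : ∀ cs : List Char, ¬ (['/', '/'] <:+: cs) → tb cs = cs := by
  intro cs
  induction cs with
  | nil => intro _; simp [tb]
  | cons c cs ih =>
    intro h
    cases cs with
    | nil => simp [tb]
    | cons d cs =>
      have hnot : ¬ (c = '/' ∧ d = '/') := by
        intro ⟨h1, h2⟩
        exact h (by subst h1; subst h2; exact ⟨[], cs, by simp⟩)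
      have htail : ¬ (['/', '/'] <:+: d :: cs) := fun hi => h (hi.trans (List.suffix_cons c (d :: cs)).isInfix)
      simp only [tb, if_neg hnot]
      rw [ih htail]

lemma tb_eq_take : ∀ (cs : List Char) (k : Nat), ['/', '/'] <+: cs.drop k →
    (∀ i < k, ¬ (['/', '/'] <+: cs.drop i)) → tb cs = cs.take k := by
  intro cs
  induction cs with
  | nil =>
    intro k hpre _
    simp at hpre
  | cons c cs ih =>
    intro k hpre hmin
    cases k with
    | zero =>
      simp only [List.drop_zero] at hpre
      obtain ⟨t, ht⟩ := hpre
      cases cs with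
      | nil => simp at ht
      | cons d cs' =>
        simp at ht
        obtain ⟨h1, h2, _⟩ := ht
        subst h1; subst h2
        simp [tb]
    | succ k =>
      have hpre' : ['/', '/'] <+: cs.drop k := by simpa using hpre
      have hmin' : ∀ i < k, ¬ (['/', '/'] <+: cs.drop i) := by
        intro i hi
        have := hmin (i + 1) (by omega)
        simpa using this
      have h0 := hmin 0 (by omega)
      simp only [List.drop_zero] at h0
      have hnot : ¬ (c = '/' ∧ cs.head? = some '/') := by
        rintro ⟨h1, h2⟩
        cases cs with
        | nil => simp at h2
        | cons d cs' =>
          simp at h2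
          exact h0 (by subst h1; subst h2; exact ⟨cs', by simp⟩)
      cases cs with
      | nil =>
        exfalso
        simp at hpre'
      | cons d cs' =>
        have hnotcd : ¬ (c = '/' ∧ d = '/') := by
          intro ⟨h1, h2⟩; exact hnot ⟨h1, by simp [h2]⟩
        simp only [tb, if_neg hnotcd, List.take_succ_cons]
        rw [ih k hpre' hmin']

-- characterisation of B's prefix at the char-list level
lemma alt_toList (line : String) :
    (get_parsed_command_alt line).toList =
      (tb (PySem.Str.strip line).toList).filter (fun c => c ≠ '/') := by
  unfold get_parsed_command_alt
  set l := PySem.Str.strip line with hl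
  by_cases hfind : PySem.Str.find l "//" = -1
  · simp only [hfind, if_true]
    have hni : ¬ (['/', '/'] <:+: l.toList) := by
      have := PySem.Str.find_eq_neg_one_iff (s := l) (sub := "//")
      have h2 := this.mp hfind
      simpa using h2
    rw [tb_of_not_infix l.toList hni]
    simp
  · simp only [if_neg hfind]
    have hfe : PySem.Str.find l "//" = PySem.Chars.find l.toList "//".toList :=
      PySem.Str.find_eq l "//" 
    have hnonneg : 0 ≤ PySem.Chars.find l.toList "//".toList := by
      rw [hfe] at hfind
      have h1 := PySem.Chars.neg_one_le_find (s := l.toList) (sub := "//".toList)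
      omega
    obtain ⟨hp, hm⟩ := PySem.Chars.find_spec (s := l.toList) (sub := "//".toList) hnonneg
    have hsub : "//".toList = ['/', '/'] := by decide
    have hslice : (PySem.Str.slice l none (some (PySem.Str.find l "//"))).toList
        = l.toList.take (PySem.Chars.find l.toList "//".toList).toNat := by
      rw [PySem.Str.toList_slice, hfe]
      simp only [PySem.Chars.slice_eq_listSlice]
      exact PySem.List.slice_to _ hnonneg
    rw [hslice, tb_eq_take l.toList (PySem.Chars.find l.toList "//".toList).toNat
      (by rw [← hsub]; exact hp)
      (by intro i hi; rw [← hsub]; exact hm i hi)]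
    simp

-- ===== VERDICT (by name: the statement is the Claim_ definition above) =====
theorem get_parsed_command_spec : Claim_equal_get_parsed_command := by
  intro line _
  unfold Spec_get_parsed_command
  apply String.toList_inj.mp
  rw [alt_toList]
  unfold get_parsed_command
  set l := PySem.Str.strip line with hl
  by_cases hz : PySem.Str.len l = 0
  · have : l.toList = [] := by
      have := hz
      simp [PySem.Str.len] at this
      simpa using this
    simp [this, tb]
  · simp only [if_neg hz]
    rw [goA_eq_tb_filter l.toList.length l.toList le_rfl ""]
    simp
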